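-- pv_equiv track=rewrite | github.com/PamelaPajarillo/HEPQIS-LivingReview | utils.py | get_journal_doi
-- ===== SOURCE A (Python) =====
-- def get_journal_doi(doi, metadata_doi):
--     if doi != 'nan':
--         if len(metadata_doi['publication_info']) != 1:
--             full_journal_name = ''
--             for i in metadata_doi['publication_info']:
--                 if 'pubinfo_freetext' in i.keys():
--                     full_journal_name = i['pubinfo_freetext']
--                 elif 'journal_title' in i.keys():
--                     full_journal_name = i['journal_title']
--             return full_journal_name
--         elif 'pubinfo_freetext' in metadata_doi['publication_info'][0].keys():
--             return metadata_doi['publication_info'][0]['pubinfo_freetext']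
--         else:
--             return metadata_doi['publication_info'][0]['journal_title']
--     else:
--         return 'nan'
-- ===== SOURCE B (Python) =====
-- def get_journal_doi(doi, metadata_doi):
--     if doi == 'nan':
--         return 'nan'
--     pub = metadata_doi['publication_info']
--     if len(pub) == 1:
--         entry = pub[0]
--         if 'pubinfo_freetext' in entry:
--             return entry['pubinfo_freetext']
--         return entry['journal_title']
--     for i in reversed(pub):
--         if 'pubinfo_freetext' in i:
--             return i['pubinfo_freetext']
--         if 'journal_title' in i:
--             return i['journal_title']
--     return ''
-- ===== Notes on version B (the rewrite author's own statement) =====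
-- stated objective: alternative
-- what changed: The forward accumulate-last-wins loop over publication_info is replaced by an early-return scan over the reversed list (first match from the right wins), keeping the len==1 special case; last-wins semantics becomes first-hit-of-reverse.
import Mathlib
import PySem

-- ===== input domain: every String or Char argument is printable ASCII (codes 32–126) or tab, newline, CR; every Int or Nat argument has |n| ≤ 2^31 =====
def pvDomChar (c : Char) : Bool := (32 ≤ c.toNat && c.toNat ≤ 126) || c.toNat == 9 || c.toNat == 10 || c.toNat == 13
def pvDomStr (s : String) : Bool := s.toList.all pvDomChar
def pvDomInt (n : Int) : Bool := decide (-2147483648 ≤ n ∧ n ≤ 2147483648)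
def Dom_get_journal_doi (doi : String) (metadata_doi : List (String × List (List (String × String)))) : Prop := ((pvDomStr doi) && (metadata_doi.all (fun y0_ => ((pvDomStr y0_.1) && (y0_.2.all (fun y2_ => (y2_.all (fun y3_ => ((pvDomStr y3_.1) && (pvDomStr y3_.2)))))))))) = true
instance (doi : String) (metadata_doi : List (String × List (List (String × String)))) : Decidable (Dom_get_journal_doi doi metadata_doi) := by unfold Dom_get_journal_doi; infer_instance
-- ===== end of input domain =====

-- B replaces A's forward last-wins accumulation over publication_info by an early-return
-- scan of the reversed list (same cost, different decomposition); Pre_ excludes the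
-- inputs where the Python A raises KeyError.


-- shared primitive: Python dict lookup on an association list (first match)
def pvLookup {α : Type} (l : List (String × α)) (k : String) : Option α :=
  (l.find? (fun p => p.1 == k)).map (·.2)

-- ===== PORT A =====
def get_journal_doi (doi : String) (metadata_doi : List (String × List (List (String × String)))) : String :=
  if doi ≠ "nan" then
    match pvLookup metadata_doi "publication_info" with
    | none => ""   -- KeyError in Python; outside Pre_
    | some pi =>
      if pi.length ≠ 1 then
        pi.foldl (fun acc i =>
          match pvLookup i "pubinfo_freetext" with
          | some v => v
          | none =>
            match pvLookup i "journal_title" with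
            | some v => v
            | none => acc) ""
      else
        let e0 := (PySem.List.pyGet? pi 0).getD []
        match pvLookup e0 "pubinfo_freetext" with
        | some v => v
        | none => (pvLookup e0 "journal_title").getD ""   -- KeyError in Python; outside Pre_
  else "nan"

-- ===== PORT B =====
def altScan : List (List (String × String)) → String
  | [] => ""
  | i :: rest =>
    match pvLookup i "pubinfo_freetext" with
    | some v => v
    | none =>
      match pvLookup i "journal_title" with
      | some v => v
      | none => altScan rest

def get_journal_doi_alt (doi : String) (metadata_doi : List (String × List (List (String × String)))) : String :=
  if doi == "nan" then "nan"
  else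
    match pvLookup metadata_doi "publication_info" with
    | none => ""   -- KeyError in Python; outside Pre_
    | some pub =>
      if pub.length == 1 then
        let entry := (PySem.List.pyGet? pub 0).getD []
        match pvLookup entry "pubinfo_freetext" with
        | some v => v
        | none => (pvLookup entry "journal_title").getD ""   -- KeyError in Python; outside Pre_
      else altScan pub.reverse

-- ===== PRECONDITION & SPEC =====
-- Pre_ excludes exactly the inputs where A raises KeyError: a missing 'publication_info'
-- key (when doi != 'nan'), or a single-element publication_info whose element has neither
-- 'pubinfo_freetext' nor 'journal_title'. B raises there too.
def preB (doi : String) (metadata_doi : List (String × List (List (String × String)))) : Bool :=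
  doi == "nan" ||
    match pvLookup metadata_doi "publication_info" with
    | none => false
    | some [e] => (pvLookup e "pubinfo_freetext").isSome || (pvLookup e "journal_title").isSome
    | some _ => true

def Pre_get_journal_doi (doi : String) (metadata_doi : List (String × List (List (String × String)))) : Prop :=
  preB doi metadata_doi = true
instance (doi : String) (metadata_doi : List (String × List (List (String × String)))) : Decidable (Pre_get_journal_doi doi metadata_doi) := by unfold Pre_get_journal_doi; infer_instance

def pvWitness_get_journal_doi : String × (List (String × List (List (String × String)))) :=
  ("10.1/x", [("publication_info", [[("journal_title", "A")], [("pubinfo_freetext", "B")]])])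

def Spec_get_journal_doi (doi : String) (metadata_doi : List (String × List (List (String × String)))) (out : String) : Prop := out = get_journal_doi_alt doi metadata_doi
instance (doi : String) (metadata_doi : List (String × List (List (String × String)))) (out : String) : Decidable (Spec_get_journal_doi doi metadata_doi out) := by unfold Spec_get_journal_doi; infer_instance

-- ===== CLAIM (what is proved, stated in full; the proofs are below) =====
def Claim_equal_get_journal_doi : Prop := ∀ (doi : String) (metadata_doi : List (String × List (List (String × String)))), Dom_get_journal_doi doi metadata_doi → Pre_get_journal_doi doi metadata_doi → Spec_get_journal_doi doi metadata_doi (get_journal_doi doi metadata_doi)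

-- ===== LEMMAS AND PROOFS =====

-- the per-element "hit" both loops test, as an Option
def pvHit (i : List (String × String)) : Option String :=
  match pvLookup i "pubinfo_freetext" with
  | some v => some v
  | none => pvLookup i "journal_title"

theorem altScan_eq (l : List (List (String × String))) :
    altScan l = (l.findSome? pvHit).getD "" := by
  induction l with
  | nil => rfl
  | cons i t ih =>
    simp only [altScan, List.findSome?, pvHit]
    cases pvLookup i "pubinfo_freetext" with
    | some v => rfl
    | none => cases pvLookup i "journal_title" with
      | some v => rfl
      | none => exact ih

theorem foldl_eq (l : List (List (String × String))) (acc : String) :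
    l.foldl (fun acc i =>
      match pvLookup i "pubinfo_freetext" with
      | some v => v
      | none =>
        match pvLookup i "journal_title" with
        | some v => v
        | none => acc) acc = (l.reverse.findSome? pvHit).getD acc := by
  induction l generalizing acc with
  | nil => rfl
  | cons i t ih =>
    simp only [List.foldl_cons, List.reverse_cons, List.findSome?_append]
    rw [ih]
    cases h : t.reverse.findSome? pvHit with
    | some v => rfl
    | none =>
      simp only [Option.none_or, List.findSome?, pvHit]
      cases pvLookup i "pubinfo_freetext" with
      | some v => rfl
      | none => cases pvLookup i "journal_title" with
        | some v => rfl
        | none => rfl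

-- ===== VERDICT (by name: the statement is the Claim_ definition above) =====
theorem get_journal_doi_spec : Claim_equal_get_journal_doi := by
  intro doi md _ hpre
  unfold Spec_get_journal_doi get_journal_doi get_journal_doi_alt
  by_cases hd : doi = "nan"
  · simp [hd]
  · rw [if_pos hd, if_neg (by simpa using hd)]
    unfold Pre_get_journal_doi preB at hpre
    rw [Bool.or_eq_true, beq_iff_eq] at hpre
    replace hpre := hpre.resolve_left hd
    cases hmd : pvLookup md "publication_info" with
    | none => simp [hmd] at hpre
    | some pi =>
      by_cases hl : pi.length = 1
      · simp only [hl, ne_eq, not_true_eq_false, if_false, beq_self_eq_true, if_true]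
      · simp only [hl, ne_eq, not_false_eq_true, if_true, beq_iff_eq]
        rw [foldl_eq, altScan_eq]
        simp
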